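-- pv_equiv track=rewrite | github.com/bainianlaoyao/vibe-team | backend/app/api/files.py | _effective_permission
-- ===== SOURCE A (Python) =====
-- from enum import StrEnum
--
-- class FilePermission(StrEnum):
--     READ = "read"
--     WRITE = "write"
--     NONE = "none"
--     INHERIT = "inherit"
--
-- def _effective_permission(
--     relative_path: str,
--     permissions: dict[str, FilePermission],
-- ) -> FilePermission:
--     normalized = "." if relative_path in {"", "."} else relative_path
--     parts = [] if normalized == "." else normalized.split("/")
--     candidates = ["."]
--     current: list[str] = []
--     for part in parts:
--         current.append(part)
--         candidates.append("/".join(current))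
--     for candidate in reversed(candidates):
--         permission = permissions.get(candidate)
--         if permission is not None:
--             return permission
--     return FilePermission.READ
-- ===== SOURCE B (Python) =====
-- def _effective_permission(relative_path, permissions):
--     segs = [] if relative_path in ("", ".") else relative_path.split("/")
--     while segs:
--         permission = permissions.get("/".join(segs))
--         if permission is not None:
--             return permission
--         segs.pop()
--     return permissions.get(".", "read")
-- ===== Notes on version B (the rewrite author's own statement) =====
-- stated objective: simpler
-- what changed: Replaced A's two-phase structure (build the list of all '/'-joined prefixes, then scan it reversed) with a single loop that keeps only the current segment list, looks up its join, and pops the last segment, ending with a '.' default lookup.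
import Mathlib
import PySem

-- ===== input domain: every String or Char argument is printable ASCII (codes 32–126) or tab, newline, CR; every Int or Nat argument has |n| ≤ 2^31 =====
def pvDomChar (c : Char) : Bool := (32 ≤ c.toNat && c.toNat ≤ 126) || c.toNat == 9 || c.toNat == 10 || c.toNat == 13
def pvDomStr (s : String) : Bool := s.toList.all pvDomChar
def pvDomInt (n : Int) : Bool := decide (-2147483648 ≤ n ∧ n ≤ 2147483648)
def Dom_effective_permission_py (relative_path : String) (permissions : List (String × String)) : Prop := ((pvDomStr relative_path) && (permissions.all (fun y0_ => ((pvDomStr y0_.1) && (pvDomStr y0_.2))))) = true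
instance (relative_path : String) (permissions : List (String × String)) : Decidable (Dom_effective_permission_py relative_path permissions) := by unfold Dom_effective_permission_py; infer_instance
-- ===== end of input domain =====

-- B replaces A's "build all prefix candidates, then scan reversed" with one loop that
-- joins the current segment list, looks it up and pops the last segment (objective: simpler).

-- ===== PORT A =====
-- permissions.get(candidate): first-match lookup in the dict (assoc list in insertion order)
def permGet (perms : List (String × String)) (k : String) : Option String :=
  (PySem.Dict.mk perms).get? k

-- the 'for candidate in reversed(candidates): … return permission' loop (early return)
def firstHit (cands : List String) (perms : List (String × String)) : Option String :=
  match cands with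
  | [] => none
  | c :: rest =>
    match permGet perms c with
    | some p => some p
    | none => firstHit rest perms

def effective_permission_py (relative_path : String) (permissions : List (String × String)) : String :=
  let normalized := if relative_path = "" ∨ relative_path = "." then "." else relative_path
  let parts : List String := if normalized = "." then [] else (PySem.Str.split? normalized "/").getD []
  let st := parts.foldl
    (fun (st : List String × List String) part =>
      let current := st.2 ++ [part]
      (st.1 ++ [PySem.Str.join "/" current], current))
    (["."], [])
  match firstHit st.1.reverse permissions with
  | some p => p
  | none => "read"

-- ===== PORT B =====
-- the 'while segs: … segs.pop()' loop of Source B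
def bLoop (segs : List String) (perms : List (String × String)) : String :=
  if segs = [] then (PySem.Dict.mk perms).getD "." "read"
  else
    match permGet perms (PySem.Str.join "/" segs) with
    | some p => p
    | none => bLoop segs.dropLast perms
termination_by segs.length
decreasing_by
  rename_i h
  have : segs.length ≠ 0 := fun h0 => h (List.eq_nil_of_length_eq_zero h0)
  simp [List.length_dropLast]; omega

def effective_permission_py_alt (relative_path : String) (permissions : List (String × String)) : String :=
  let segs : List String :=
    if relative_path = "" ∨ relative_path = "." then [] else (PySem.Str.split? relative_path "/").getD []
  bLoop segs permissions

-- ===== PRECONDITION & SPEC =====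
def Spec_effective_permission_py (relative_path : String) (permissions : List (String × String)) (out : String) : Prop := out = effective_permission_py_alt relative_path permissions
instance (relative_path : String) (permissions : List (String × String)) (out : String) : Decidable (Spec_effective_permission_py relative_path permissions out) := by unfold Spec_effective_permission_py; infer_instance

-- ===== CLAIM (what is proved, stated in full; the proofs are below) =====
def Claim_equal_effective_permission_py : Prop := ∀ (relative_path : String) (permissions : List (String × String)), Dom_effective_permission_py relative_path permissions → Spec_effective_permission_py relative_path permissions (effective_permission_py relative_path permissions)

-- ===== LEMMAS AND PROOFS =====

-- the joins A's fold appends while consuming l, starting from accumulated segments cur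
def auxJoins (cur : List String) (l : List String) : List String :=
  match l with
  | [] => []
  | x :: t => PySem.Str.join "/" (cur ++ [x]) :: auxJoins (cur ++ [x]) t

theorem foldA_eq (l : List String) (c cur : List String) :
    l.foldl
      (fun (st : List String × List String) part =>
        let current := st.2 ++ [part]
        (st.1 ++ [PySem.Str.join "/" current], current))
      (c, cur)
    = (c ++ auxJoins cur l, cur ++ l) := by
  induction l generalizing c cur with
  | nil => simp [auxJoins]
  | cons x t ih =>
    simp only [List.foldl_cons, auxJoins]
    rw [ih]
    simp

theorem auxJoins_append (l : List String) (cur : List String) (x : String) :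
    auxJoins cur (l ++ [x]) = auxJoins cur l ++ [PySem.Str.join "/" (cur ++ l ++ [x])] := by
  induction l generalizing cur with
  | nil => simp [auxJoins]
  | cons y t ih =>
    simp only [List.cons_append, auxJoins, ih]
    simp

theorem main_loop_eq (segs : List String) (perms : List (String × String)) :
    (match firstHit (("." :: auxJoins [] segs).reverse) perms with
      | some p => p
      | none => "read")
    = bLoop segs perms := by
  induction segs using List.reverseRecOn with
  | nil =>
    have h1 : ("." :: auxJoins [] ([] : List String)).reverse = ["."] := by simp [auxJoins]
    rw [h1, bLoop, PySem.Dict.getD_eq_get?_getD]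
    simp only [firstHit]
    cases h : permGet perms "." <;> simp [permGet] at h <;> simp [h]
  | append_singleton t x ih =>
    rw [auxJoins_append]
    have hrev : ("." :: (auxJoins [] t ++ [PySem.Str.join "/" ([] ++ t ++ [x])])).reverse
        = PySem.Str.join "/" (t ++ [x]) :: ("." :: auxJoins [] t).reverse := by
      simp
    rw [hrev]
    rw [bLoop, if_neg (by simp), List.dropLast_concat]
    simp only [firstHit]
    cases permGet perms (PySem.Str.join "/" (t ++ [x])) with
    | some p => rfl
    | none => simpa using ih

-- ===== VERDICT (by name: the statement is the Claim_ definition above) =====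
theorem effective_permission_py_spec : Claim_equal_effective_permission_py := by
  intro rp perms _
  show effective_permission_py rp perms = effective_permission_py_alt rp perms
  unfold effective_permission_py effective_permission_py_alt
  by_cases h : rp = "" ∨ rp = "."
  · simp only [h, if_pos]
    simpa using main_loop_eq [] perms
  · push_neg at h
    simp only [if_neg (show ¬(rp = "" ∨ rp = ".") from by tauto), if_neg h.2, foldA_eq]
    simpa using main_loop_eq ((PySem.Str.split? rp "/").getD []) perms
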